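-- pv_equiv track=rewrite | github.com/981377660LMT/algorithm-study | 17_模式匹配/LCP/allPairLcp.py | allPairLcp
-- ===== SOURCE A (Python) =====
-- from typing import List
--
-- def allPairLcp(words: List[str]) -> int:
--     root = dict()  # char -> (count, children)
--     res = 0
--     for word in words:
--         cur = root
--         for c in word:
--             if c in cur:
--                 v = cur[c]
--                 res += v[0]
--                 v[0] += 1
--             else:
--                 cur[c] = [1, dict()]
--             cur = cur[c][1]
--     return res
-- ===== SOURCE B (Python) =====
-- from typing import List
--
--
-- def _lcp(a: str, b: str) -> int:
--     n = min(len(a), len(b))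
--     k = 0
--     while k < n and a[k] == b[k]:
--         k += 1
--     return k
--
--
-- def allPairLcp(words: List[str]) -> int:
--     res = 0
--     seen = []
--     for w in words:
--         for v in seen:
--             res += _lcp(v, w)
--         seen.append(w)
--     return res
-- ===== Notes on version B (the rewrite author's own statement) =====
-- stated objective: simpler
-- what changed: Replaced the mutable trie with online count accumulation by a direct double loop that sums the longest-common-prefix length of every pair of words.
import Mathlib
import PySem

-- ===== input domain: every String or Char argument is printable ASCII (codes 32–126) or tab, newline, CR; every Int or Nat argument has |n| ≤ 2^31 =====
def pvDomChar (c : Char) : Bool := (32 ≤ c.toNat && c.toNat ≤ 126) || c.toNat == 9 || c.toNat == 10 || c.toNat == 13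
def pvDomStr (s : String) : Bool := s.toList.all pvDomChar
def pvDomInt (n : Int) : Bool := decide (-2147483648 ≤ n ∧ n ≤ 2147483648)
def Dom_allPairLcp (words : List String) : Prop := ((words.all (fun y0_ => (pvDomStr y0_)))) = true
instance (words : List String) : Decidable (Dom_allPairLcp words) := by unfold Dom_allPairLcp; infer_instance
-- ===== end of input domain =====

-- B replaces A's mutable trie (online count accumulation) with a plain double loop
-- summing the LCP length of every pair; objective: simpler (not faster).

-- ===== PORT A =====
-- A's trie: Python dict 'char -> [count, children]' ported by hand as an ordered
-- entry list (exact: dict keys are chars, insertion appends at the end, lookup is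
-- first match). 'Trie.cons c cnt child rest' is one dict entry followed by the rest.
inductive Trie where
  | nil : Trie
  | cons : Char → Int → Trie → Trie → Trie
deriving Repr

-- the fresh chain A builds once a char is absent (every subsequent char hits the else branch)
def chainA : List Char → Trie
  | [] => Trie.nil
  | c :: cs => Trie.cons c 1 (chainA cs) Trie.nil

-- one word's inner loop of A: walk/extend the trie, returning (new trie, res gained)
def insertA : Trie → List Char → Trie × Int
  | t, [] => (t, 0)
  | Trie.nil, c :: cs => (Trie.cons c 1 (chainA cs) Trie.nil, 0)
  | Trie.cons d cnt child rest, c :: cs =>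
      if d = c then
        let p := insertA child cs
        (Trie.cons d (cnt + 1) p.1 rest, p.2 + cnt)
      else
        let p := insertA rest (c :: cs)
        (Trie.cons d cnt child p.1, p.2)
termination_by t w => (w.length, sizeOf t)
decreasing_by
  · simp_wf; omega
  · simp_wf; omega

def stepA (st : Trie × Int) (w : String) : Trie × Int :=
  let p := insertA st.1 w.toList
  (p.1, st.2 + p.2)

def allPairLcp (words : List String) : Int :=
  (words.foldl stepA (Trie.nil, 0)).2

-- ===== PORT B =====
-- Source B's _lcp: advance while the chars agree
def lcpLen : List Char → List Char → Int
  | a :: as_, b :: bs => if a = b then 1 + lcpLen as_ bs else 0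
  | _, _ => 0

-- Source B's outer loop: 'seen' is the list of already-processed words
def altGo : List String → List String → Int
  | _, [] => 0
  | seen, w :: rest =>
      (seen.map (fun v => lcpLen v.toList w.toList)).sum + altGo (seen ++ [w]) rest

def allPairLcp_alt (words : List String) : Int := altGo [] words

-- ===== PRECONDITION & SPEC =====
def Spec_allPairLcp (words : List String) (out : Int) : Prop := out = allPairLcp_alt words
instance (words : List String) (out : Int) : Decidable (Spec_allPairLcp words out) := by unfold Spec_allPairLcp; infer_instance

-- ===== CLAIM (what is proved, stated in full; the proofs are below) =====
def Claim_equal_allPairLcp : Prop := ∀ (words : List String), Dom_allPairLcp words → Spec_allPairLcp words (allPairLcp words)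

-- ===== LEMMAS AND PROOFS =====

theorem insertA_nil_word (t : Trie) : insertA t [] = (t, 0) := by
  cases t <;> simp [insertA]

theorem insertA_nil_trie_snd (w : List Char) : (insertA Trie.nil w).2 = 0 := by
  cases w <;> simp [insertA]

theorem lcpLen_nil_right (v : List Char) : lcpLen v [] = 0 := by
  cases v <;> simp [lcpLen]

-- inserting a word into the fresh chain of ds earns exactly lcp ds cs
theorem chainA_snd (ds cs : List Char) : (insertA (chainA ds) cs).2 = lcpLen ds cs := by
  induction ds generalizing cs with
  | nil => cases cs <;> simp [chainA, insertA, lcpLen]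
  | cons d ds ih =>
      cases cs with
      | nil => simp [insertA_nil_word, lcpLen_nil_right]
      | cons c cs =>
          by_cases h : d = c
          · subst h; simp [chainA, insertA, lcpLen, ih]; ring
          · simp [chainA, insertA, lcpLen, h]

-- key commuting lemma: a prior insert of v raises w's earned res by exactly lcp v w
theorem insert_insert_snd (t : Trie) (v w : List Char) :
    (insertA (insertA t v).1 w).2 = (insertA t w).2 + lcpLen v w := by
  match w, t, v with
  | [], t, v => simp [insertA_nil_word, lcpLen_nil_right]
  | c :: cs, t, [] => simp [insertA_nil_word, lcpLen]
  | c :: cs, Trie.nil, d :: ds =>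
      by_cases h : d = c
      · subst h; simp [insertA, lcpLen, chainA_snd]; ring
      · simp [insertA, lcpLen, h]
  | c :: cs, Trie.cons e cnt child rest, d :: ds =>
      by_cases hed : e = d
      · subst hed
        by_cases hec : e = c
        · subst hec
          have ih := insert_insert_snd child ds cs
          simp [insertA, lcpLen, ih]
          omega
        · simp [insertA, lcpLen, hec]
      · by_cases hec : e = c
        · have hdc : ¬ d = c := fun h => hed (hec.trans h.symm)
          simp [insertA, lcpLen, hec, hdc, Ne.symm hdc]
        · by_cases hdc : d = c
          · subst hdc
            have ih := insert_insert_snd rest (d :: ds) (d :: cs)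
            simp [insertA, lcpLen, hed] at ih ⊢
            omega
          · have ih := insert_insert_snd rest (d :: ds) (c :: cs)
            simp [insertA, lcpLen, hed, hec, hdc] at ih ⊢
            omega
termination_by (w.length, sizeOf t)
decreasing_by
  · simp_wf; omega
  · simp_wf; omega
  · simp_wf; omega

-- inserting w into the trie built from 'seen' (starting at any t) earns Σ lcp(v,w) over seen
theorem insert_build_snd (seen : List String) (t : Trie) (w : List Char) :
    (insertA (seen.foldl (fun t v => (insertA t v.toList).1) t) w).2
      = (insertA t w).2 + (seen.map (fun v => lcpLen v.toList w)).sum := by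
  induction seen generalizing t with
  | nil => simp
  | cons v seen ih =>
      simp only [List.foldl_cons, List.map_cons, List.sum_cons]
      rw [ih, insert_insert_snd]
      ring

theorem loop_eq (ws seen : List String) (acc : Int) :
    (ws.foldl stepA (seen.foldl (fun t v => (insertA t v.toList).1) Trie.nil, acc)).2
      = acc + altGo seen ws := by
  induction ws generalizing seen acc with
  | nil => simp [altGo]
  | cons w ws ih =>
      have hfst : (stepA (seen.foldl (fun t v => (insertA t v.toList).1) Trie.nil, acc) w).1
          = (seen ++ [w]).foldl (fun t v => (insertA t v.toList).1) Trie.nil := by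
        simp [stepA]
      have := ih (seen ++ [w])
        (acc + (insertA (seen.foldl (fun t v => (insertA t v.toList).1) Trie.nil) w.toList).2)
      simp only [List.foldl_cons, altGo]
      rw [show stepA (seen.foldl (fun t v => (insertA t v.toList).1) Trie.nil, acc) w
            = ((seen ++ [w]).foldl (fun t v => (insertA t v.toList).1) Trie.nil,
               acc + (insertA (seen.foldl (fun t v => (insertA t v.toList).1) Trie.nil) w.toList).2) by
            simp [stepA]]
      rw [this, insert_build_snd seen Trie.nil w.toList, insertA_nil_trie_snd]
      ring

-- ===== VERDICT (by name: the statement is the Claim_ definition above) =====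
theorem allPairLcp_spec : Claim_equal_allPairLcp := by
  intro words _
  unfold Spec_allPairLcp allPairLcp allPairLcp_alt
  have := loop_eq words [] 0
  simpa using this
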